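-- pv_equiv track=rewrite | github.com/AugustinBrain/concord_compiler | CFG.py | compute_predict_set
-- ===== SOURCE A (Python) =====
-- def compute_predict_set(cfg, first_set, follow_set):
--     predict_set = {}
--
--     for non_terminal, productions in cfg.items():
--         for production in productions:
--             production_key = (non_terminal, tuple(production))  # A = (A,(prod))
--             predict_set[production_key] = set()
--
--             first_alpha = set()
--             for symbol in production:
--                 if symbol in first_set:  # non-terminal
--                     first_alpha.update(first_set[symbol] - {"λ"})
--                     if "λ" not in first_set[symbol]:
--                         break
--                 else:  # terminal
--                     first_alpha.add(symbol)
--                     break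
--             else:
--                 first_alpha.add("λ")
--
--             predict_set[production_key].update(first_alpha - {"λ"})
--
--             # if λ in first_alpha, add follow set of lhs to predict set
--             if "λ" in first_alpha:
--                 predict_set[production_key].update(follow_set[non_terminal])
--
--     return predict_set
-- ===== SOURCE B (Python) =====
-- def compute_predict_set(cfg, first_set, follow_set):
--     def first_of_sequence(symbols):
--         if not symbols:
--             return {"\u03bb"}
--         head = symbols[0]
--         if head not in first_set:
--             return {head}
--         firsts = first_set[head] - {"\u03bb"}
--         if "\u03bb" in first_set[head]:
--             return firsts | first_of_sequence(symbols[1:])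
--         return firsts
--
--     def predict(non_terminal, production):
--         first_alpha = first_of_sequence(production)
--         result = first_alpha - {"\u03bb"}
--         if "\u03bb" in first_alpha:
--             result = result | follow_set[non_terminal]
--         return result
--
--     return {(nt, tuple(p)): predict(nt, p)
--             for nt, productions in cfg.items()
--             for p in productions}
-- ===== Notes on version B (the rewrite author's own statement) =====
-- stated objective: alternative
-- what changed: A's imperative nested loops with a mutable dict, an insert-empty-then-update per production and a loop/break/for-else FIRST accumulator are replaced by two pure helper functions (a recursive first_of_sequence and predict) and a single dict comprehension that builds the whole result in one expression.
import Mathlib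
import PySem

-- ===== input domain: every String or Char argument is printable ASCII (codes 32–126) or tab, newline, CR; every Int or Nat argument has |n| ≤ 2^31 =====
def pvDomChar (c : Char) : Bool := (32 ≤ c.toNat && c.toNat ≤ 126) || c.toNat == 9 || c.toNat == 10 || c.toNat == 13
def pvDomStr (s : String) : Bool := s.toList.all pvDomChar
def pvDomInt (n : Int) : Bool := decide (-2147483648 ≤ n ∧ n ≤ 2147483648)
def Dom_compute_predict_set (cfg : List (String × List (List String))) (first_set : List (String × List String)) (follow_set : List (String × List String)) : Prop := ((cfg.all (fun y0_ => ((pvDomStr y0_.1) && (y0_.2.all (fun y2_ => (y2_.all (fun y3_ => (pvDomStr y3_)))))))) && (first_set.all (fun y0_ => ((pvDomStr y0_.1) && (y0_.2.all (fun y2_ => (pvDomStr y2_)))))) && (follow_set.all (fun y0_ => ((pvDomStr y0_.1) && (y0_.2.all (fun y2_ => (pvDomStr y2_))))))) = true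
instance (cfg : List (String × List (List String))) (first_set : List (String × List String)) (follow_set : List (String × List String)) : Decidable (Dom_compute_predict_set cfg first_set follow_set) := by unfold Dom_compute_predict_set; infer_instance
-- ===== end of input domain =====

-- B replaces A's imperative nested loops and mutable dict with two pure helpers
-- (recursive first_of_sequence, predict) and a single dict comprehension (objective: alternative decomposition).


-- ===== PORT A =====
-- A's inner `for symbol in production: … break / else: add "λ"` loop: returns the accumulated
-- first_alpha together with a flag saying whether the loop broke (for-else adds "λ" when it did not).
def pvA_firstLoop (first : PySem.Dict String (List String)) : List String → PySem.Set String → PySem.Set String × Bool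
  | [], acc => (acc, false)
  | s :: rest, acc =>
    match first.get? s with
    | some fs =>
      let acc' := PySem.Set.update acc (PySem.Set.diff (PySem.Set.ofList fs) ["λ"])
      if PySem.Set.contains (PySem.Set.ofList fs) "λ" then
        pvA_firstLoop first rest acc'
      else (acc', true)
    | none => (PySem.Set.add acc s, true)

-- body of A's inner `for production in productions` loop (getD [] is total; Pre_ guarantees the
-- lookup that Python's follow_set[non_terminal] performs actually succeeds where it is reached)
def pvA_doProduction (first : PySem.Dict String (List String)) (follow : PySem.Dict String (List String)) (nt : String) (pd : PySem.Dict (String × List String) (PySem.Set String)) (production : List String) : PySem.Dict (String × List String) (PySem.Set String) :=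
  let pd1 := pd.insert (nt, production) PySem.Set.empty
  let r := pvA_firstLoop first production PySem.Set.empty
  let first_alpha := if r.2 then r.1 else PySem.Set.add r.1 "λ"
  let v := PySem.Set.update PySem.Set.empty (PySem.Set.diff first_alpha ["λ"])
  let v' := if PySem.Set.contains first_alpha "λ" then PySem.Set.update v (follow.getD nt []) else v
  pd1.insert (nt, production) v'

def compute_predict_set (cfg : List (String × List (List String))) (first_set : List (String × List String)) (follow_set : List (String × List String)) : List (String × List String × List String) :=
  let first := PySem.Dict.ofList first_set
  let follow := PySem.Dict.ofList follow_set
  let d := cfg.foldl (fun pd e => e.2.foldl (pvA_doProduction first follow e.1) pd) PySem.Dict.empty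
  d.items.map (fun p => (p.1.1, p.1.2, p.2))

-- ===== PORT B =====
-- B's recursive helper first_of_sequence(symbols)
def pvB_firstSeq (first : PySem.Dict String (List String)) : List String → PySem.Set String
  | [] => ["λ"]
  | s :: rest =>
    match first.get? s with
    | none => [s]
    | some fs =>
      let firsts := PySem.Set.diff (PySem.Set.ofList fs) ["λ"]
      if PySem.Set.contains (PySem.Set.ofList fs) "λ" then
        PySem.Set.union firsts (pvB_firstSeq first rest)
      else firsts

-- B's pure helper predict(non_terminal, production)
def pvB_predict (first follow : PySem.Dict String (List String)) (nt : String) (production : List String) : PySem.Set String :=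
  let first_alpha := pvB_firstSeq first production
  let result := PySem.Set.diff first_alpha ["λ"]
  if PySem.Set.contains first_alpha "λ" then PySem.Set.union result (follow.getD nt []) else result

-- B's dict comprehension: the key/value pairs in comprehension order, collected into a dict
def compute_predict_set_alt (cfg : List (String × List (List String))) (first_set : List (String × List String)) (follow_set : List (String × List String)) : List (String × List String × List String) :=
  let first := PySem.Dict.ofList first_set
  let follow := PySem.Dict.ofList follow_set
  let pairs := cfg.flatMap (fun e => e.2.map (fun p => ((e.1, p), pvB_predict first follow e.1 p)))
  (PySem.Dict.ofList pairs).items.map (fun q => (q.1.1, q.1.2, q.2))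

-- ===== PRECONDITION & SPEC =====
-- pvNsym first s: A's inner loop continues past symbol s (s is a first_set key whose set has "λ")
def pvNsym (first : PySem.Dict String (List String)) (s : String) : Bool := (first.getD s []).contains "λ"

-- "λ" ends up in first_alpha: either the loop never broke (all symbols nullable non-terminals),
-- or it broke at the literal terminal symbol "λ" (possible only when "λ" is not a first_set key)
def pvNeedsFollow (first : PySem.Dict String (List String)) (prod : List String) : Bool :=
  match prod.dropWhile (pvNsym first) with
  | [] => true
  | s :: _ => s == "λ" && !(first.contains s)

-- Pre_ excludes exactly the inputs on which Python A raises KeyError: a production whose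
-- first_alpha contains "λ" while its left-hand side is missing from follow_set.
def Pre_compute_predict_set (cfg : List (String × List (List String))) (first_set : List (String × List String)) (follow_set : List (String × List String)) : Prop :=
  ∀ e ∈ cfg, (∃ prod ∈ e.2, pvNeedsFollow (PySem.Dict.ofList first_set) prod = true) →
    (PySem.Dict.ofList follow_set).contains e.1 = true
instance (cfg : List (String × List (List String))) (first_set : List (String × List String)) (follow_set : List (String × List String)) : Decidable (Pre_compute_predict_set cfg first_set follow_set) := by unfold Pre_compute_predict_set; infer_instance

def pvWitness_compute_predict_set : (List (String × List (List String))) × (List (String × List String)) × (List (String × List String)) :=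
  ([("S", [["a"], []])], [("S", ["a"])], [("S", ["$"])])

def Spec_compute_predict_set (cfg : List (String × List (List String))) (first_set : List (String × List String)) (follow_set : List (String × List String)) (out : List (String × List String × List String)) : Prop := out = compute_predict_set_alt cfg first_set follow_set
instance (cfg : List (String × List (List String))) (first_set : List (String × List String)) (follow_set : List (String × List String)) (out : List (String × List String × List String)) : Decidable (Spec_compute_predict_set cfg first_set follow_set out) := by unfold Spec_compute_predict_set; infer_instance

-- ===== CLAIM (what is proved, stated in full; the proofs are below) =====
def Claim_equal_compute_predict_set : Prop := ∀ (cfg : List (String × List (List String))) (first_set : List (String × List String)) (follow_set : List (String × List String)), Dom_compute_predict_set cfg first_set follow_set → Pre_compute_predict_set cfg first_set follow_set → Spec_compute_predict_set cfg first_set follow_set (compute_predict_set cfg first_set follow_set)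

-- ===== LEMMAS AND PROOFS =====

-- set.update distributes: s.update(x.add(a)) = (s.update(x)).add(a)
lemma pv_update_add (acc x : List String) (a : String) :
    PySem.Set.update acc (PySem.Set.add x a) = PySem.Set.add (PySem.Set.update acc x) a := by
  rw [PySem.Set.add_eq_ite]
  by_cases h : a ∈ x
  · rw [if_pos h, PySem.Set.add_of_mem (by rw [PySem.Set.mem_update]; exact Or.inr h)]
  · rw [if_neg h, PySem.Set.update_append]
    rfl

lemma pv_update_update (acc x y : List String) :
    PySem.Set.update acc (PySem.Set.update x y) = PySem.Set.update (PySem.Set.update acc x) y := by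
  induction y generalizing x with
  | nil => rfl
  | cons a y ih =>
      rw [PySem.Set.update_cons, ih (PySem.Set.add x a), pv_update_add,
        PySem.Set.update_cons (PySem.Set.update acc x)]

-- A's loop result (including the for-else "λ") is acc updated with B's recursive first set
lemma pvA_loop_eq_firstSeq (first : PySem.Dict String (List String)) (prod : List String) (acc : PySem.Set String) :
    (let r := pvA_firstLoop first prod acc; if r.2 then r.1 else PySem.Set.add r.1 "λ")
      = PySem.Set.update acc (pvB_firstSeq first prod) := by
  induction prod generalizing acc with
  | nil => rfl
  | cons s rest ih =>
      simp only [pvA_firstLoop, pvB_firstSeq]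
      cases hfs : first.get? s with
      | none => rfl
      | some fs =>
          by_cases hl : PySem.Set.contains (PySem.Set.ofList fs) "λ" = true
          · simp only [hl, if_pos]
            rw [ih, PySem.Set.union, pv_update_update]
          · simp only [hl]
            rfl

lemma pvB_firstSeq_nodup (first : PySem.Dict String (List String)) (prod : List String) :
    (pvB_firstSeq first prod).Nodup := by
  induction prod with
  | nil => simp [pvB_firstSeq]
  | cons s rest ih =>
      simp only [pvB_firstSeq]
      cases first.get? s with
      | none => simp
      | some fs =>
          by_cases hl : PySem.Set.contains (PySem.Set.ofList fs) "λ" = true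
          · simp only [hl, if_pos]
            exact PySem.Set.nodup_union _ _ (PySem.Set.nodup_diff _ _ (PySem.Set.nodup_ofList _))
          · simp only [hl]
            exact PySem.Set.nodup_diff _ _ (PySem.Set.nodup_ofList _)

-- A's per-production body is one insert of B's pure predict value
lemma pv_doProduction_eq_insert (first follow : PySem.Dict String (List String)) (nt : String) :
    pvA_doProduction first follow nt
      = fun pd production => pd.insert (nt, production) (pvB_predict first follow nt production) := by
  funext pd production
  unfold pvA_doProduction pvB_predict
  rw [PySem.Dict.insert_insert_self]
  have hfa : (let r := pvA_firstLoop first production PySem.Set.empty;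
      if r.2 then r.1 else PySem.Set.add r.1 "λ") = pvB_firstSeq first production := by
    rw [pvA_loop_eq_firstSeq]
    exact PySem.Set.ofList_eq_self_of_nodup _ (pvB_firstSeq_nodup first production)
  simp only [← hfa]
  have hdiff : PySem.Set.update PySem.Set.empty
      (PySem.Set.diff (pvB_firstSeq first production) ["λ"])
      = PySem.Set.diff (pvB_firstSeq first production) ["λ"] :=
    PySem.Set.ofList_eq_self_of_nodup _
      (PySem.Set.nodup_diff _ _ (pvB_firstSeq_nodup first production))
  rw [hfa, hdiff]
  rfl

-- a nested insert loop over (outer, inner) equals one insert fold over the flattened pair list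
lemma pv_foldl_flatMap {α β κ ν : Type} [BEq κ] (l : List α) (g : α → List β)
    (k : α → β → κ) (v : α → β → ν) (d : PySem.Dict κ ν) :
    l.foldl (fun pd e => (g e).foldl (fun pd p => pd.insert (k e p) (v e p)) pd) d
      = (l.flatMap (fun e => (g e).map (fun p => (k e p, v e p)))).foldl
          (fun pd q => pd.insert q.1 q.2) d := by
  induction l generalizing d with
  | nil => rfl
  | cons e l ih =>
      rw [List.flatMap_cons, List.foldl_append, List.foldl_cons, ih, List.foldl_map]

-- ===== VERDICT (by name: the statement is the Claim_ definition above) =====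
theorem compute_predict_set_spec : Claim_equal_compute_predict_set := by
  intro cfg first_set follow_set _ _
  unfold Spec_compute_predict_set compute_predict_set compute_predict_set_alt
  simp only [pv_doProduction_eq_insert]
  rw [pv_foldl_flatMap]
  rfl
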